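-- pv_equiv track=rewrite | github.com/elin-olsson/ssh-tls-auditor | auditor.py | _hostname_matches
-- ===== SOURCE A (Python) =====
-- def _hostname_matches(target: str, names: list[str]) -> bool:
--     """Return True if target matches any name (supports *.example.com wildcards)."""
--     target = target.lower()
--     for name in names:
--         name = name.lower()
--         if name == target:
--             return True
--         if name.startswith("*."):
--             suffix = name[1:]
--             rest   = target[: -len(suffix)]
--             if target.endswith(suffix) and "." not in rest:
--                 return True
--     return False
-- ===== SOURCE B (Python) =====
-- def _hostname_matches(target: str, names: list[str]) -> bool:
--     """Return True if target matches any name (supports *.example.com wildcards)."""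
--     tl = target.lower().split(".")
--     return any(
--         nl == tl
--         or (nl[0] == "*" and len(nl) >= 2 and len(nl) == len(tl) and nl[1:] == tl[1:])
--         for nl in (name.lower().split(".") for name in names)
--     )
-- ===== Notes on version B (the rewrite author's own statement) =====
-- stated objective: idiomatic
-- what changed: Replaces A's startswith/endswith string-suffix and slice arithmetic with a positional comparison of DNS label lists (split on '.') and an any() scan; same results on every input.
import Mathlib
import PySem

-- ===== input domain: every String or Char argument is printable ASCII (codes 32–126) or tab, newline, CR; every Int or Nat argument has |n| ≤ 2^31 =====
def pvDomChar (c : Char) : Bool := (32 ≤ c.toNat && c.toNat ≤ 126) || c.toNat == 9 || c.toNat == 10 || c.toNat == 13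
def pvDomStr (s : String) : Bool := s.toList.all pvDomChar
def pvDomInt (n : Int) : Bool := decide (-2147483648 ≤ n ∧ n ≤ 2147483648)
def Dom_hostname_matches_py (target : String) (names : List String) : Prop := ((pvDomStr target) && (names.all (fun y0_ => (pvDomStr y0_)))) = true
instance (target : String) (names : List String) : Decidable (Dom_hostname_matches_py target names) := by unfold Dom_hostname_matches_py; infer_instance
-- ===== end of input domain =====

-- B replaces A's endswith/slice suffix arithmetic by comparing DNS label lists (split on '.'): same results, more idiomatic.

-- ===== PORT A =====
-- one iteration of A's 'for name in names' body: True on an exact or wildcard hit, else fall through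
def pvAOne (t : List Char) (name : String) : Bool :=
  let n := PySem.Chars.lower name.toList
  if n == t then true
  else if PySem.Chars.startswith n ['*', '.'] then
    let suffix := PySem.List.slice n (some 1) none
    let restPart := PySem.List.slice t none (some (-(suffix.length : Int)))
    PySem.Chars.endswith t suffix && !(PySem.Chars.isIn ['.'] restPart)
  else false

def pvALoop (t : List Char) : List String → Bool
  | [] => false
  | name :: rest => if pvAOne t name then true else pvALoop t rest

def hostname_matches_py (target : String) (names : List String) : Bool :=
  pvALoop (PySem.Chars.lower target.toList) names

-- ===== PORT B =====
-- Source B's s.split(".") is ported as List.splitOn '.' — exact for a single-character separator;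
-- nl[0] is nl.headI (a Python split result is never empty, so no IndexError).
def pvBCheck (tl : List (List Char)) (name : String) : Bool :=
  let nl := List.splitOn '.' (PySem.Chars.lower name.toList)
  nl == tl ||
    (nl.headI == ['*'] && decide (2 ≤ nl.length) && nl.length == tl.length && nl.tail == tl.tail)

def hostname_matches_py_alt (target : String) (names : List String) : Bool :=
  names.any (pvBCheck (List.splitOn '.' (PySem.Chars.lower target.toList)))

-- ===== PRECONDITION & SPEC =====
def Spec_hostname_matches_py (target : String) (names : List String) (out : Bool) : Prop := out = hostname_matches_py_alt target names
instance (target : String) (names : List String) (out : Bool) : Decidable (Spec_hostname_matches_py target names out) := by unfold Spec_hostname_matches_py; infer_instance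

-- ===== CLAIM (what is proved, stated in full; the proofs are below) =====
def Claim_equal_hostname_matches_py : Prop := ∀ (target : String) (names : List String), Dom_hostname_matches_py target names → Spec_hostname_matches_py target names (hostname_matches_py target names)

-- ===== LEMMAS AND PROOFS =====

lemma pvSplit_ne_nil (t : List Char) : List.splitOn '.' t ≠ [] := by
  simpa [List.splitOn] using List.splitOnP_ne_nil (fun x => x == '.') t

-- split of "dot-free piece ++ '.' ++ rest" peels off the piece
lemma pvSplit_append (p r : List Char) (h : '.' ∉ p) :
    List.splitOn '.' (p ++ '.' :: r) = p :: List.splitOn '.' r := by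
  induction p with
  | nil => simp [List.splitOn, List.splitOnP_cons]
  | cons a p ih =>
    simp only [List.mem_cons, not_or] at h
    simp only [List.cons_append, List.splitOn, List.splitOnP_cons] at *
    rw [if_neg (by simp only [beq_iff_eq]; exact fun e => h.1 e.symm), ih h.2]
    rfl

-- every piece of a split is dot-free
lemma pvSplit_free : ∀ (t : List Char), ∀ x ∈ List.splitOn '.' t, '.' ∉ x := by
  intro t
  induction t with
  | nil => intro x hx; simp [List.splitOn, List.splitOnP_nil] at hx; simp [hx]
  | cons a t ih =>
    intro x hx
    simp only [List.splitOn, List.splitOnP_cons] at hx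
    by_cases ha : a = '.'
    · rw [if_pos (by simpa using ha)] at hx
      rcases List.mem_cons.mp hx with rfl | hx
      · simp
      · exact ih x hx
    · rw [if_neg (by simpa using ha)] at hx
      obtain ⟨y, l, hl⟩ := List.exists_cons_of_ne_nil (pvSplit_ne_nil t)
      have hl' : List.splitOnP (fun x => x == '.') t = y :: l := by
        simpa [List.splitOn] using hl
      rw [hl'] at hx
      simp only [List.modifyHead, List.mem_cons] at hx
      rcases hx with rfl | hx
      · intro hmem
        rcases List.mem_cons.mp hmem with e | hmem
        · exact ha e.symm
        · exact ih y (hl ▸ List.mem_cons_self ..) hmem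
      · exact ih x (hl ▸ List.mem_cons_of_mem _ hx)

lemma pvSplit_inj (n t : List Char) : List.splitOn '.' n = List.splitOn '.' t ↔ n = t := by
  constructor
  · intro h
    rw [← List.intercalate_splitOn n '.', ← List.intercalate_splitOn t '.', h]
  · intro h; rw [h]

lemma pvIntercalate_cons (x : List Char) (l : List (List Char)) (h : l ≠ []) :
    ['.'].intercalate (x :: l) = x ++ '.' :: ['.'].intercalate l := by
  obtain ⟨y, m, rfl⟩ := List.exists_cons_of_ne_nil h
  simp [List.intercalate, List.intersperse]

-- B's per-name guard (first label "*", at least two labels) forces A's "name.startswith('*.')"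
lemma pvHead_star (n : List Char)
    (h1 : (List.splitOn '.' n).headI = ['*']) (h2 : 2 ≤ (List.splitOn '.' n).length) :
    ∃ r, n = '*' :: '.' :: r ∧ List.splitOn '.' n = ['*'] :: List.splitOn '.' r := by
  obtain ⟨x, l, hl⟩ := List.exists_cons_of_ne_nil (pvSplit_ne_nil n)
  rw [hl] at h1 h2
  simp only [List.headI] at h1
  subst h1
  have hlne : l ≠ [] := by
    intro h; rw [h] at h2; simp at h2
  have hn : n = '*' :: '.' :: ['.'].intercalate l := by
    have h := List.intercalate_splitOn n '.'
    rw [hl, pvIntercalate_cons _ _ hlne] at h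
    simpa using h.symm
  refine ⟨['.'].intercalate l, hn, ?_⟩
  rw [hn]
  simpa using pvSplit_append ['*'] (['.'].intercalate l) (by simp)

-- the wildcard branch of A ⟺ the wildcard branch of B, propositionally
lemma pvWildcard_iff (n t : List Char) :
    (['*','.'] <+: n ∧ n.tail <:+ t ∧ '.' ∉ t.take (t.length - n.tail.length))
    ↔ ((List.splitOn '.' n).headI = ['*'] ∧ 2 ≤ (List.splitOn '.' n).length ∧
       (List.splitOn '.' n).length = (List.splitOn '.' t).length ∧
       (List.splitOn '.' n).tail = (List.splitOn '.' t).tail) := by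
  constructor
  · rintro ⟨⟨r, rfl⟩, hsuf, hfree⟩
    have htail : (['*','.'] ++ r).tail = '.' :: r := by simp
    rw [htail] at hsuf hfree
    obtain ⟨p, rfl⟩ := hsuf
    have hlen : (p ++ '.' :: r).length - ('.' :: r).length = p.length := by
      simp [List.length_append]
    rw [hlen, List.take_left] at hfree
    have hsn : List.splitOn '.' (['*','.'] ++ r) = ['*'] :: List.splitOn '.' r :=
      pvSplit_append ['*'] r (by simp)
    have hst : List.splitOn '.' (p ++ '.' :: r) = p :: List.splitOn '.' r :=
      pvSplit_append p r hfree
    have hpos : 0 < (List.splitOn '.' r).length := List.length_pos_of_ne_nil (pvSplit_ne_nil r)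
    refine ⟨by rw [hsn]; rfl, by rw [hsn]; simp only [List.length_cons]; omega,
      by rw [hsn, hst]; simp, by rw [hsn, hst]; rfl⟩
  · rintro ⟨h1, h2, h3, h4⟩
    obtain ⟨r, rfl, hsn⟩ := pvHead_star _ h1 h2
    obtain ⟨y, m, ht⟩ := List.exists_cons_of_ne_nil (pvSplit_ne_nil t)
    rw [hsn, ht] at h4
    simp only [List.tail_cons] at h4
    have hmne : m ≠ [] := by
      rw [← h4]; exact pvSplit_ne_nil r
    have htval : t = y ++ '.' :: r := by
      have h := List.intercalate_splitOn t '.'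
      rw [ht, pvIntercalate_cons _ _ hmne, ← h4, List.intercalate_splitOn r '.'] at h
      exact h.symm
    have hfree : '.' ∉ y := pvSplit_free t y (ht ▸ List.mem_cons_self ..)
    refine ⟨⟨r, rfl⟩, ?_, ?_⟩
    · rw [htval]; exact ⟨y, by simp⟩
    · have hlen : t.length - (('*' :: '.' :: r).tail).length = y.length := by
        rw [htval]; simp [List.length_append]
      rw [hlen, htval, List.take_left]
      exact hfree

-- one loop iteration of A equals B's per-name check
lemma pvOne (t : List Char) (name : String) :
    pvAOne t name = pvBCheck (List.splitOn '.' t) name := by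
  unfold pvAOne pvBCheck
  set n := PySem.Chars.lower name.toList with hn
  by_cases heq : n = t
  · simp [heq]
  · rw [if_neg (by simpa using heq)]
    have hBeq : (List.splitOn '.' n == List.splitOn '.' t) = false := by
      simp [pvSplit_inj, heq]
    by_cases hsw : PySem.Chars.startswith n ['*', '.'] = true
    · rw [if_pos hsw]
      have hpre : ['*','.'] <+: n := (PySem.Chars.startswith_iff n ['*','.']).mp hsw
      obtain ⟨r, hr⟩ := hpre
      have hslice1 : PySem.List.slice n (some 1) none = n.tail := PySem.List.slice_from_one n
      have htail : n.tail = '.' :: r := by rw [← hr]; simp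
      have hpos : 0 < n.tail.length := by rw [htail]; simp
      have hslice2 : PySem.List.slice t none (some (-(n.tail.length : Int)))
          = t.take (t.length - n.tail.length) :=
        PySem.List.slice_to_neg_natCast t n.tail.length hpos
      simp only [hslice1, hslice2, hBeq, Bool.false_or]
      rw [Bool.eq_iff_iff]
      simp only [Bool.and_eq_true, Bool.not_eq_true', beq_iff_eq, decide_eq_true_eq,
        PySem.Chars.endswith_iff, PySem.Chars.isIn_eq_false_iff, List.singleton_infix_iff]
      constructor
      · rintro ⟨hsuf, hfr⟩
        have := (pvWildcard_iff n t).mp ⟨⟨r, hr⟩, hsuf, hfr⟩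
        exact ⟨⟨⟨this.1, this.2.1⟩, this.2.2.1⟩, this.2.2.2⟩
      · rintro ⟨⟨⟨h1, h2⟩, h3⟩, h4⟩
        have := (pvWildcard_iff n t).mpr ⟨h1, h2, h3, h4⟩
        exact ⟨this.2.1, this.2.2⟩
    · rw [if_neg hsw]
      simp only [hBeq, Bool.false_or]
      symm
      rw [Bool.eq_false_iff]
      intro hcontra
      simp only [Bool.and_eq_true, beq_iff_eq, decide_eq_true_eq] at hcontra
      obtain ⟨⟨⟨h1, h2⟩, -⟩, -⟩ := hcontra
      obtain ⟨r, hnr, -⟩ := pvHead_star n h1 h2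
      exact hsw ((PySem.Chars.startswith_iff n ['*','.']).mpr ⟨r, by rw [hnr]; rfl⟩)

-- the whole loop of A equals B's any-scan
lemma pvLoop_eq (t : List Char) (names : List String) :
    pvALoop t names = names.any (pvBCheck (List.splitOn '.' t)) := by
  induction names with
  | nil => rfl
  | cons name rest ih =>
    simp only [pvALoop, List.any_cons]
    rw [← pvOne, ih]
    cases pvAOne t name <;> simp

-- ===== VERDICT (by name: the statement is the Claim_ definition above) =====
theorem hostname_matches_py_spec : Claim_equal_hostname_matches_py := by
  intro target names _
  unfold Spec_hostname_matches_py hostname_matches_py hostname_matches_py_alt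
  exact pvLoop_eq _ _
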